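-- pv_equiv track=rewrite | github.com/BlakeBallew/Small-Projects | wordle/wordle_assist.py | convert_wl
-- ===== SOURCE A (Python) =====
-- def convert_wl(guess):
--     guess = list(guess)
--     output = []
--     x = 0
--     while x < len(guess):
--         if (guess[x] == "[") or (guess[x] == "("):
--             output.append("".join(guess[x:x+3]))
--             del guess[x]
--             del guess[x]
--             del guess[x]
--         else:
--             output.append(guess[x])
--             x += 1
--     return output
-- ===== SOURCE B (Python) =====
-- def convert_wl(guess):
--     # Single forward pass over the string: on '[' or '(' take the 3-char
--     # slice and jump the index by 3; no in-place list deletions.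
--     out = []
--     i = 0
--     n = len(guess)
--     while i < n:
--         c = guess[i]
--         if c == "[" or c == "(":
--             out.append(guess[i:i+3])
--             i += 3
--         else:
--             out.append(c)
--             i += 1
--     return out
-- ===== Notes on version B (the rewrite author's own statement) =====
-- stated objective: simpler
-- what changed: B scans the string once, advancing the index by 3 on a bracket and slicing the token directly, instead of A's repeated in-place list deletions which shift the whole tail each time.
import Mathlib
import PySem

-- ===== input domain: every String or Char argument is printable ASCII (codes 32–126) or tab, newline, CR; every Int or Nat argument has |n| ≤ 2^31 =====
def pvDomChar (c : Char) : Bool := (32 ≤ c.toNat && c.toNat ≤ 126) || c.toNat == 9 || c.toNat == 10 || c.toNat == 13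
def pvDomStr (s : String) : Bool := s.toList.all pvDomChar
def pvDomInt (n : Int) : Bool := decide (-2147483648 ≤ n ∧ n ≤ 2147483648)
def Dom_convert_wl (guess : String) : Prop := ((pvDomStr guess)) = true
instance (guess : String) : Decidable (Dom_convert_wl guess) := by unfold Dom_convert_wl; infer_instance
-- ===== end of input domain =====

-- B tokenizes in a single forward pass that advances by 3 characters on a bracket,
-- instead of A's delete-in-place while loop (objective: simpler).


-- ===== PORT A =====
-- A's while loop over the mutable char list: on a bracket, append the 3-char slice
-- ("".join(guess[x:x+3]) = take 3 of the suffix, x ≥ 0) and perform three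
-- `del guess[x]` (List.eraseIdx). The loop runs ≤ length+1 iterations (each one
-- raises x or shrinks the list), so fuel = length+1 is exact; inputs on which a
-- `del` raises IndexError are exactly those outside Pre_ below.
def convert_wl_loop : Nat → List Char → Nat → List String → List String
  | 0, _, _, out => out
  | fuel + 1, g, x, out =>
    if h : x < g.length then
      if g[x] = '[' ∨ g[x] = '(' then
        convert_wl_loop fuel (((g.eraseIdx x).eraseIdx x).eraseIdx x) x
          (out ++ [String.mk ((g.drop x).take 3)])
      else
        convert_wl_loop fuel g (x + 1) (out ++ [String.mk [g[x]]])
    else out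

def convert_wl (guess : String) : List String :=
  convert_wl_loop (guess.toList.length + 1) guess.toList 0 []

-- ===== PORT B =====
-- B's single pass: a bracket takes the 3-char slice guess[i:i+3] and jumps i by 3
-- (the `i += 3` / short-tail cases are the two match arms); otherwise one char, i += 1.
def convert_wl_altGo : List Char → List String
  | [] => []
  | c :: rest =>
    if c = '[' ∨ c = '(' then
      match rest with
      | a :: b :: t => String.mk [c, a, b] :: convert_wl_altGo t
      | short => [String.mk (c :: short)]
    else String.mk [c] :: convert_wl_altGo rest

def convert_wl_alt (guess : String) : List String :=
  convert_wl_altGo guess.toList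

-- ===== PRECONDITION & SPEC =====
-- Shape condition: every '[' or '(' starting a token has at least 3 characters from it.
def wfTok : List Char → Bool
  | [] => true
  | c :: rest =>
    if c = '[' ∨ c = '(' then
      match rest with
      | _ :: _ :: rest' => wfTok rest'
      | _ => false
    else wfTok rest

-- Pre_ excludes exactly the inputs on which A raises IndexError (no returning input is excluded).
def Pre_convert_wl (guess : String) : Prop := wfTok guess.toList = true
instance (guess : String) : Decidable (Pre_convert_wl guess) := by
  unfold Pre_convert_wl; infer_instance

def pvWitness_convert_wl : String := ""

def Spec_convert_wl (guess : String) (out : List String) : Prop := out = convert_wl_alt guess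
instance (guess : String) (out : List String) : Decidable (Spec_convert_wl guess out) := by
  unfold Spec_convert_wl; infer_instance

-- ===== CLAIM (what is proved, stated in full; the proofs are below) =====
def Claim_equal_convert_wl : Prop :=
  ∀ (guess : String), Dom_convert_wl guess → Pre_convert_wl guess →
    Spec_convert_wl guess (convert_wl guess)

-- ===== LEMMAS AND PROOFS =====

-- three successive `del` at the same index = cut three elements out of the list
lemma erase3_eq (g : List Char) : ∀ (x : Nat), x + 3 ≤ g.length →
    ((g.eraseIdx x).eraseIdx x).eraseIdx x = g.take x ++ g.drop (x + 3) := by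
  induction g with
  | nil => intro x hx; simp at hx
  | cons c t ih =>
    intro x hx
    cases x with
    | zero =>
      match t, hx with
      | a :: b :: t', _ => simp [List.eraseIdx]
    | succ x =>
      simp only [List.eraseIdx_cons_succ, List.take_succ_cons, List.drop_succ_cons]
      rw [ih x (by simpa using hx), List.cons_append]

-- unfolding lemmas for B's pass and the shape condition on an opaque tail
lemma altGo_nb (c : Char) (rest : List Char) (h : ¬(c = '[' ∨ c = '(')) :
    convert_wl_altGo (c :: rest) = String.mk [c] :: convert_wl_altGo rest := by
  cases rest with
  | nil => simp [convert_wl_altGo, h]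
  | cons a r => cases r <;> simp [convert_wl_altGo, h]

lemma altGo_br (c a b : Char) (t : List Char) (h : c = '[' ∨ c = '(') :
    convert_wl_altGo (c :: a :: b :: t) = String.mk [c, a, b] :: convert_wl_altGo t := by
  simp [convert_wl_altGo, h]

lemma wfTok_nb (c : Char) (rest : List Char) (h : ¬(c = '[' ∨ c = '(')) :
    wfTok (c :: rest) = wfTok rest := by
  cases rest with
  | nil => simp [wfTok, h]
  | cons a r => cases r <;> simp [wfTok, h]

lemma wfTok_br (c a b : Char) (t : List Char) (h : c = '[' ∨ c = '(') :
    wfTok (c :: a :: b :: t) = wfTok t := by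
  simp [wfTok, h]

-- the loop from state (g, x, out) with a well-formed suffix equals out ++ B's pass over it
lemma loop_eq : ∀ (fuel : Nat) (g : List Char) (x : Nat) (out : List String),
    g.length - x < fuel → wfTok (g.drop x) = true →
    convert_wl_loop fuel g x out = out ++ convert_wl_altGo (g.drop x) := by
  intro fuel
  induction fuel with
  | zero => intro g x out hn; omega
  | succ fuel ih =>
    intro g x out hn hwf
    rw [convert_wl_loop]
    by_cases hx : x < g.length
    · simp only [hx, dif_pos]
      have hd : g.drop x = g[x] :: g.drop (x + 1) := by
        rw [List.drop_eq_getElem_cons hx]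
      by_cases hb : g[x] = '[' ∨ g[x] = '('
      · -- bracket: wf forces ≥ 2 more chars
        rcases hrest : g.drop (x + 1) with _ | ⟨a, _ | ⟨b, t⟩⟩
        · rw [hd, hrest] at hwf; simp [wfTok, hb] at hwf
        · rw [hd, hrest] at hwf; simp [wfTok, hb] at hwf
        · rw [hd, hrest, wfTok_br _ _ _ _ hb] at hwf
          have hlen : x + 3 ≤ g.length := by
            have := congrArg List.length hrest
            simp [List.length_drop] at this
            omega
          have ht : g.drop (x + 3) = t := by
            have h23 : g.drop (x + 3) = (g.drop (x + 1)).drop 2 := by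
              rw [List.drop_drop]
            rw [h23, hrest]; rfl
          simp only [hb, if_pos]
          rw [erase3_eq g x hlen]
          have hlt : (g.take x).length = x := by
            simp [List.length_take]; omega
          have hdrop : (g.take x ++ g.drop (x + 3)).drop x = g.drop (x + 3) :=
            List.drop_left' hlt
          rw [ih _ _ _ (by simp [List.length_take, List.length_drop]; omega)
                (by rw [hdrop, ht]; exact hwf)]
          rw [hdrop, ht, hd, hrest, altGo_br _ _ _ _ hb]
          simp
      · -- ordinary char
        rw [hd, wfTok_nb _ _ hb] at hwf
        simp only [hb, if_false]
        rw [ih _ _ _ (by omega) hwf]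
        rw [hd, altGo_nb _ _ hb]
        simp
    · simp [hx, List.drop_eq_nil_of_le (by omega : g.length ≤ x), convert_wl_altGo]

-- ===== VERDICT (by name: the statement is the Claim_ definition above) =====
theorem convert_wl_spec : Claim_equal_convert_wl := by
  intro guess _ hpre
  unfold Spec_convert_wl convert_wl convert_wl_alt
  have := loop_eq (guess.toList.length + 1) guess.toList 0 [] (by omega) (by simpa using hpre)
  simpa using this
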